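-- pv_equiv track=rewrite | github.com/akkerman/advent_of_code | 2017/util_09.py | take_garbage
-- ===== SOURCE A (Python) =====
-- def take_garbage(line:str) -> str:
--     output = ''
--     in_garbage = False
--     ignore_next = False
--     for char in line:
--         if ignore_next:
--             ignore_next = False
--             continue
--         if char == '<' and not in_garbage:
--             in_garbage = True
--             continue
--         if char == '>' and in_garbage:
--             in_garbage = False
--             continue
--         if char == '!':
--             ignore_next = True
--             continue
--         if in_garbage:
--             output += char
--             continue
--     return output
-- ===== SOURCE B (Python) =====
-- def take_garbage(line: str) -> str:
--     # phase 1: strip every '!'-escape together with the escaped character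
--     cleaned = []
--     i = 0
--     n = len(line)
--     while i < n:
--         if line[i] == '!':
--             i += 2
--         else:
--             cleaned.append(line[i])
--             i += 1
--     # phase 2: two-state scan collecting garbage content
--     out = []
--     in_garbage = False
--     for c in cleaned:
--         if in_garbage:
--             if c == '>':
--                 in_garbage = False
--             else:
--                 out.append(c)
--         elif c == '<':
--             in_garbage = True
--     return ''.join(out)
-- ===== Notes on version B (the rewrite author's own statement) =====
-- stated objective: alternative
-- what changed: Replaces A's single tri-state machine (in_garbage + ignore_next) with two passes: a first pass strips every escape pair, then a two-state scan over the cleaned string collects garbage content.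
import Mathlib
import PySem

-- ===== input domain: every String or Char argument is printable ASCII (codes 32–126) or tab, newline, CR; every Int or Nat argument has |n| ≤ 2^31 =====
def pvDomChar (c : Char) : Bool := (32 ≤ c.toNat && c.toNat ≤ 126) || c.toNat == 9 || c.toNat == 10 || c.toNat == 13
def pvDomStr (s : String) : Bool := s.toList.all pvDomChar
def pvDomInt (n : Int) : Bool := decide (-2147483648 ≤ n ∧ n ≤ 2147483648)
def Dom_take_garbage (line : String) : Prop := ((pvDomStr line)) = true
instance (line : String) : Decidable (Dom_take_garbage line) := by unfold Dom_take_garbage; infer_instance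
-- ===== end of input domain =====

-- B is a different decomposition of the same task (same cost): escape-stripping pass, then a two-state scan.

-- ===== PORT A =====
-- A's for loop over the characters: one fold carrying (output, in_garbage, ignore_next).
def tgStepA (st : String × Bool × Bool) (char : Char) : String × Bool × Bool :=
  let (output, in_garbage, ignore_next) := st
  if ignore_next then (output, in_garbage, false)
  else if char == '<' && !in_garbage then (output, true, false)
  else if char == '>' && in_garbage then (output, false, false)
  else if char == '!' then (output, in_garbage, true)
  else if in_garbage then (output.push char, in_garbage, false)
  else st

def take_garbage (line : String) : String :=
  (line.toList.foldl tgStepA ("", false, false)).1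

-- ===== PORT B =====
-- phase 1 of Source B: the index loop stepping by 2 on '!' and by 1 otherwise, as a recursion on the char list
def tgClean : List Char → List Char
  | [] => []
  | c :: rest =>
    if c == '!' then
      match rest with
      | [] => []
      | _ :: r => tgClean r
    else c :: tgClean rest

-- phase 2 of Source B: the two-state scan carrying (out, in_garbage)
def tgStepB (st : String × Bool) (c : Char) : String × Bool :=
  let (out, in_garbage) := st
  if in_garbage then
    if c == '>' then (out, false) else (out.push c, in_garbage)
  else if c == '<' then (out, true)
  else st

def take_garbage_alt (line : String) : String :=
  ((tgClean line.toList).foldl tgStepB ("", false)).1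

-- ===== PRECONDITION & SPEC =====
def Spec_take_garbage (line : String) (out : String) : Prop := out = take_garbage_alt line
instance (line : String) (out : String) : Decidable (Spec_take_garbage line out) := by unfold Spec_take_garbage; infer_instance

-- ===== CLAIM (what is proved, stated in full; the proofs are below) =====
def Claim_equal_take_garbage : Prop := ∀ (line : String), Dom_take_garbage line → Spec_take_garbage line (take_garbage line)

-- ===== LEMMAS AND PROOFS =====
-- The A-machine started with ignore_next = false agrees, in output and garbage flag,
-- with the B-scan over the cleaned list.
theorem tg_main : ∀ (l : List Char) (out : String) (g : Bool),
    (l.foldl tgStepA (out, g, false)).1 = ((tgClean l).foldl tgStepB (out, g)).1 ∧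
    (l.foldl tgStepA (out, g, false)).2.1 = ((tgClean l).foldl tgStepB (out, g)).2 := by
  intro l
  induction l using tgClean.induct with
  | case1 => intro out g; simp [tgClean]
  | case2 c hc =>
    -- c = '!', rest = []
    intro out g
    have hc' : c = '!' := by simpa using hc
    subst hc'
    simp [tgClean, List.foldl, tgStepA]
  | case3 c hc d r ih =>
    -- c = '!', rest = d :: r : the escape consumes d, then continue
    intro out g
    have hc' : c = '!' := by simpa using hc
    subst hc'
    simpa [tgClean, List.foldl, tgStepA] using ih out g
  | case4 c r hc ih =>
    -- c ≠ '!': the cleaned list keeps c; both machines take one step on c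
    intro out g
    have hc' : (c == '!') = false := by simpa using hc
    have hclean : tgClean (c :: r) = c :: tgClean r := by
      rw [tgClean.eq_def]; simp [hc']
    rw [hclean, List.foldl_cons, List.foldl_cons]
    by_cases h1 : c = '<'
    · subst h1
      cases g with
      | false => simpa [tgStepA, tgStepB] using ih out true
      | true => simpa [tgStepA, tgStepB] using ih (out.push '<') true
    · by_cases h2 : c = '>'
      · subst h2
        cases g with
        | false => simpa [tgStepA, tgStepB, h1] using ih out false
        | true => simpa [tgStepA, tgStepB] using ih out false
      · cases g with
        | false => simpa [tgStepA, tgStepB, h1, h2, hc'] using ih out false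
        | true => simpa [tgStepA, tgStepB, h1, h2, hc'] using ih (out.push c) true

-- ===== VERDICT (by name: the statement is the Claim_ definition above) =====
theorem take_garbage_spec : Claim_equal_take_garbage := by
  intro line _
  unfold Spec_take_garbage take_garbage take_garbage_alt
  exact (tg_main line.toList "" false).1
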